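-- pv_equiv track=rewrite | github.com/brianfields/deeplearn | backend/modules/content_creation/application/mcq_generation.py | _get_correct_answer_key
-- ===== SOURCE A (Python) =====
-- class MCQGenerationError(Exception):
--     """Exception for MCQ generation errors"""
--
--     pass
--
-- def _get_correct_answer_key(options: list[str], correct_answer: str) -> str:
--     """
--     Get the correct answer key (A, B, C, D) for the correct answer text.
--
--     Args:
--         options: List of option strings
--         correct_answer: Correct answer text
--
--     Returns:
--         Correct answer key (A, B, C, D)
--
--     Raises:
--         MCQGenerationError: If correct answer not found in options
--     """
--     try:
--         correct_index = options.index(correct_answer)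
--         return chr(65 + correct_index)  # A, B, C, D, etc.
--     except ValueError:
--         # If exact match fails, try to find the closest match
--         for i, option in enumerate(options):
--             if correct_answer.strip().lower() in option.strip().lower():
--                 return chr(65 + i)
--
--         raise MCQGenerationError(f"Correct answer '{correct_answer}' not found in options: {options}")
-- ===== SOURCE B (Python) =====
-- class MCQGenerationError(Exception):
--     """Exception for MCQ generation errors"""
--
--     pass
--
-- def _get_correct_answer_key(options: list[str], correct_answer: str) -> str:
--     """Rank-and-select: build a list of (priority, index) candidates (0 = exact
--     match, 1 = case-insensitive substring match), then pick the lexicographic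
--     minimum, instead of staged searches with early returns."""
--     needle = correct_answer.strip().lower()
--     ranked = []
--     for i, option in enumerate(options):
--         if option == correct_answer:
--             ranked.append((0, i))
--         elif needle in option.strip().lower():
--             ranked.append((1, i))
--     if not ranked:
--         raise MCQGenerationError(f"Correct answer '{correct_answer}' not found in options: {options}")
--     _priority, idx = min(ranked)
--     return chr(65 + idx)
-- ===== Notes on version B (the rewrite author's own statement) =====
-- stated objective: alternative
-- what changed: Replaces A's staged search with early returns (options.index, then a fallback substring loop) by a rank-and-select reduction: one pass builds a list of (priority, index) candidates (0 = exact, 1 = fuzzy) and the answer is the lexicographic minimum of that list, so priority is decided by min(), not by control flow.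
import Mathlib
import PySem

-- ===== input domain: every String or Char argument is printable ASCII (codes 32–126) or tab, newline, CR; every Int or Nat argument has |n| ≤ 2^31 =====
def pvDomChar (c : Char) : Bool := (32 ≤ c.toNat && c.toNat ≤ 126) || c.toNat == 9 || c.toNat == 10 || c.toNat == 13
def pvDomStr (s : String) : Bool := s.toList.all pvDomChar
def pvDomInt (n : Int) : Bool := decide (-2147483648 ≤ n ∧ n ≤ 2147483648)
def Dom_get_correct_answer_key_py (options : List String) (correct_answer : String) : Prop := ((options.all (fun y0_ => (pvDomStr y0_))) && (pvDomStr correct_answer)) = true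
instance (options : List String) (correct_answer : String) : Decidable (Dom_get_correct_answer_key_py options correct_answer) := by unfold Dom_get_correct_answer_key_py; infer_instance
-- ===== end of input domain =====

-- B builds a ranked candidate list ((0,i) exact, (1,i) fuzzy) and selects the lexicographic
-- minimum, instead of A's options.index call followed by a fallback loop. Equivalence is about
-- the return value; both programs raise MCQGenerationError on the inputs Pre_ excludes.

-- ===== PORT A =====
-- the fallback loop of A: first i with correct_answer.strip().lower() in option.strip().lower()
def pvA_fuzzyLoop (ca : String) : List String → Nat → Option Nat
  | [], _ => none
  | o :: rest, i =>
    if PySem.Str.isIn (PySem.Str.lower (PySem.Str.strip ca)) (PySem.Str.lower (PySem.Str.strip o)) then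
      some i
    else pvA_fuzzyLoop ca rest (i + 1)

def get_correct_answer_key_py (options : List String) (correct_answer : String) : String :=
  match PySem.List.index? options correct_answer with
  | some i => String.ofList [Char.ofNat (65 + i)]
  | none =>
    match pvA_fuzzyLoop correct_answer options 0 with
    | some i => String.ofList [Char.ofNat (65 + i)]
    | none => ""   -- Python raises MCQGenerationError here; excluded by Pre_

-- ===== PORT B =====
-- B's loop: collect (priority, index) candidates in index order
def pvB_cands (ca needle : String) : List String → Nat → List (Nat × Nat)
  | [], _ => []
  | o :: rest, i =>
    if o == ca then (0, i) :: pvB_cands ca needle rest (i + 1)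
    else if PySem.Str.isIn needle (PySem.Str.lower (PySem.Str.strip o)) then
      (1, i) :: pvB_cands ca needle rest (i + 1)
    else pvB_cands ca needle rest (i + 1)

-- hand port of Python's min() on tuples: lexicographic order, first extremal element
def pvLexLt (a b : Nat × Nat) : Bool := a.1 < b.1 || (a.1 == b.1 && a.2 < b.2)

def pvMin? : List (Nat × Nat) → Option (Nat × Nat)
  | [] => none
  | x :: xs => some (xs.foldl (fun a b => if pvLexLt b a then b else a) x)

def get_correct_answer_key_py_alt (options : List String) (correct_answer : String) : String :=
  let needle := PySem.Str.lower (PySem.Str.strip correct_answer)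
  match pvMin? (pvB_cands correct_answer needle options 0) with
  | some (_, idx) => String.ofList [Char.ofNat (65 + idx)]
  | none => ""   -- Python raises MCQGenerationError here; excluded by Pre_

-- ===== PRECONDITION & SPEC =====
-- Pre_ excludes exactly the inputs where A (and B) raise MCQGenerationError: no exact and no fuzzy match.
def Pre_get_correct_answer_key_py (options : List String) (correct_answer : String) : Prop :=
  correct_answer ∈ options ∨
    ∃ o ∈ options, PySem.Str.isIn (PySem.Str.lower (PySem.Str.strip correct_answer))
                                  (PySem.Str.lower (PySem.Str.strip o)) = true
instance (options : List String) (correct_answer : String) : Decidable (Pre_get_correct_answer_key_py options correct_answer) := by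
  unfold Pre_get_correct_answer_key_py; infer_instance

def pvWitness_get_correct_answer_key_py : List String × String := (["yes", "no"], "no")

def Spec_get_correct_answer_key_py (options : List String) (correct_answer : String) (out : String) : Prop := out = get_correct_answer_key_py_alt options correct_answer
instance (options : List String) (correct_answer : String) (out : String) : Decidable (Spec_get_correct_answer_key_py options correct_answer out) := by unfold Spec_get_correct_answer_key_py; infer_instance

-- ===== CLAIM =====
def Claim_equal_get_correct_answer_key_py : Prop := ∀ (options : List String) (correct_answer : String), Dom_get_correct_answer_key_py options correct_answer → Pre_get_correct_answer_key_py options correct_answer → Spec_get_correct_answer_key_py options correct_answer (get_correct_answer_key_py options correct_answer)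

-- ===== LEMMAS AND PROOFS =====

lemma pvMin?_cons (x : Nat × Nat) (l : List (Nat × Nat)) :
    pvMin? (x :: l) = some (l.foldl (fun a b => if pvLexLt b a then b else a) x) := rfl

lemma pvB_cands_cons_exact (ca n o : String) (rest : List String) (i : Nat) (h : (o == ca) = true) :
    pvB_cands ca n (o :: rest) i = (0, i) :: pvB_cands ca n rest (i + 1) := by
  simp only [pvB_cands, h, if_true]

lemma pvB_cands_cons_fuzzy (ca n o : String) (rest : List String) (i : Nat)
    (h : (o == ca) = false) (hf : PySem.Str.isIn n (PySem.Str.lower (PySem.Str.strip o)) = true) :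
    pvB_cands ca n (o :: rest) i = (1, i) :: pvB_cands ca n rest (i + 1) := by
  simp only [pvB_cands, h, Bool.false_eq_true, if_false, hf, if_true]

lemma pvB_cands_cons_skip (ca n o : String) (rest : List String) (i : Nat)
    (h : (o == ca) = false) (hf : PySem.Str.isIn n (PySem.Str.lower (PySem.Str.strip o)) = false) :
    pvB_cands ca n (o :: rest) i = pvB_cands ca n rest (i + 1) := by
  simp only [pvB_cands, h, Bool.false_eq_true, if_false, hf]

lemma pvA_fuzzyLoop_cons_hit (ca o : String) (rest : List String) (i : Nat)
    (hf : PySem.Str.isIn (PySem.Str.lower (PySem.Str.strip ca)) (PySem.Str.lower (PySem.Str.strip o)) = true) :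
    pvA_fuzzyLoop ca (o :: rest) i = some i := by
  simp only [pvA_fuzzyLoop]; rw [if_pos hf]

lemma pvA_fuzzyLoop_cons_miss (ca o : String) (rest : List String) (i : Nat)
    (hf : PySem.Str.isIn (PySem.Str.lower (PySem.Str.strip ca)) (PySem.Str.lower (PySem.Str.strip o)) = false) :
    pvA_fuzzyLoop ca (o :: rest) i = pvA_fuzzyLoop ca rest (i + 1) := by
  simp only [pvA_fuzzyLoop]; rw [if_neg (by simp only [hf]; exact Bool.false_ne_true)]

-- folding the min step from accumulator a equals combining a with the min of the list
lemma foldl_min_char (l : List (Nat × Nat)) (a : Nat × Nat) :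
    l.foldl (fun a b => if pvLexLt b a then b else a) a =
      match pvMin? l with
      | none => a
      | some m => if pvLexLt m a then m else a := by
  induction l generalizing a with
  | nil => rfl
  | cons y l ih =>
    show l.foldl _ (if pvLexLt y a then y else a) = _
    rw [ih, pvMin?_cons, ih]
    cases hm : pvMin? l with
    | none => rfl
    | some m =>
      dsimp only
      split_ifs <;> first
        | rfl
        | (exfalso; simp only [pvLexLt, Bool.or_eq_true, Bool.and_eq_true, beq_iff_eq,
            decide_eq_true_eq, not_lt, not_or, not_and] at *; omega)

-- A's fallback loop returns an index ≥ its starting counter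
lemma pvA_fuzzyLoop_ge (ca : String) (xs : List String) (i j : Nat)
    (h : pvA_fuzzyLoop ca xs i = some j) : i ≤ j := by
  induction xs generalizing i with
  | nil => simp [pvA_fuzzyLoop] at h
  | cons o rest ih =>
    simp only [pvA_fuzzyLoop] at h
    split at h
    · injection h with h'; omega
    · have := ih (i + 1) h; omega

-- if some option fuzzy-matches, A's fallback loop succeeds
lemma pvA_fuzzyLoop_isSome (ca : String) (xs : List String) (i : Nat)
    (h : ∃ o ∈ xs, PySem.Str.isIn (PySem.Str.lower (PySem.Str.strip ca)) (PySem.Str.lower (PySem.Str.strip o)) = true) :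
    (pvA_fuzzyLoop ca xs i).isSome := by
  induction xs generalizing i with
  | nil => simp at h
  | cons o rest ih =>
    simp only [pvA_fuzzyLoop]
    split
    · rfl
    · rcases h with ⟨o', ho', hm⟩
      rcases List.mem_cons.mp ho' with rfl | ho'
      · simp_all
      · exact ih _ ⟨o', ho', hm⟩

-- characterization: the lex-min of B's candidate list is A's staged result
lemma pvMin_cands (ca : String) (xs : List String) (i : Nat) :
    pvMin? (pvB_cands ca (PySem.Str.lower (PySem.Str.strip ca)) xs i) =
      match PySem.List.index? xs ca with
      | some k => some (0, i + k)
      | none => (pvA_fuzzyLoop ca xs i).map (fun j => (1, j)) := by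
  induction xs generalizing i with
  | nil => rfl
  | cons o rest ih =>
    by_cases he : o = ca
    · subst he
      rw [PySem.List.index?_cons_self o rest,
          pvB_cands_cons_exact _ _ _ _ _ (by simp), pvMin?_cons, foldl_min_char, ih]
      cases hk : PySem.List.index? rest o with
      | some k =>
        have h1 : pvLexLt (0, i + 1 + k) (0, i) = false := by
          simp only [pvLexLt]; simp; omega
        simp only [h1, Bool.false_eq_true, if_false, Nat.add_zero]
      | none =>
        cases hf : pvA_fuzzyLoop o rest (i + 1) with
        | none => rfl
        | some j =>
          have h1 : pvLexLt (1, j) (0, i) = false := by simp [pvLexLt]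
          simp only [Option.map_some, h1, Bool.false_eq_true, if_false, Nat.add_zero]
    · have hb : (o == ca) = false := by simp [he]
      rw [PySem.List.index?_cons_of_ne rest he]
      by_cases hf : PySem.Str.isIn (PySem.Str.lower (PySem.Str.strip ca)) (PySem.Str.lower (PySem.Str.strip o)) = true
      · rw [pvB_cands_cons_fuzzy _ _ _ _ _ hb hf, pvMin?_cons, foldl_min_char, ih,
            pvA_fuzzyLoop_cons_hit _ _ _ _ hf]
        cases hk : PySem.List.index? rest ca with
        | some k =>
          have h1 : pvLexLt (0, i + 1 + k) (1, i) = true := by simp [pvLexLt]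
          simp only [h1, if_true, Option.map_some]
          have : i + 1 + k = i + (k + 1) := by omega
          rw [this]
        | none =>
          cases hj : pvA_fuzzyLoop ca rest (i + 1) with
          | none => rfl
          | some j =>
            have hij : i + 1 ≤ j := pvA_fuzzyLoop_ge ca rest (i + 1) j hj
            have h1 : pvLexLt (1, j) (1, i) = false := by
              simp only [pvLexLt]; simp; omega
            simp only [Option.map_some, Option.map_none, h1, Bool.false_eq_true, if_false]
      · have hf2 : PySem.Str.isIn (PySem.Str.lower (PySem.Str.strip ca)) (PySem.Str.lower (PySem.Str.strip o)) = false :=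
          eq_false_of_ne_true hf
        rw [pvB_cands_cons_skip _ _ _ _ _ hb hf2, ih, pvA_fuzzyLoop_cons_miss _ _ _ _ hf2]
        cases hk : PySem.List.index? rest ca with
        | some k =>
          simp only [Option.map_some]
          have : i + 1 + k = i + (k + 1) := by omega
          rw [this]
        | none => rfl

-- ===== VERDICT =====
theorem get_correct_answer_key_py_spec : Claim_equal_get_correct_answer_key_py := by
  intro options ca _ hpre
  unfold Spec_get_correct_answer_key_py get_correct_answer_key_py get_correct_answer_key_py_alt
  have hmin := pvMin_cands ca options 0
  cases hidx : PySem.List.index? options ca with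
  | some k =>
    rw [hidx] at hmin
    simp only [hmin, Nat.zero_add]
  | none =>
    rw [hidx] at hmin
    have hne : ca ∉ options := by rw [PySem.List.index?_eq_none_iff] at hidx; exact hidx
    have hfz : ∃ o ∈ options, PySem.Str.isIn (PySem.Str.lower (PySem.Str.strip ca)) (PySem.Str.lower (PySem.Str.strip o)) = true := by
      rcases hpre with h | h
      · exact absurd h hne
      · exact h
    cases hs : pvA_fuzzyLoop ca options 0 with
    | none => exact absurd (hs ▸ pvA_fuzzyLoop_isSome ca options 0 hfz) (by simp)
    | some j =>
      rw [hs] at hmin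
      simp only [hmin, Option.map_some]
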